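-- pv_equiv track=rewrite | github.com/FerrisMind/Oxide-Lab | tools/jinja_converter.py | generate_rust_struct
-- ===== SOURCE A (Python) =====
-- def generate_rust_struct(name, template_content, stop_tokens=None):
--     """
--     Wraps the template in a Rust TemplateEntry struct.
--     """
--     # Escape double quotes or use raw string if possible
--     # We use r#"..."# style.
--     # If the template contains "#, we need more hashes (e.g., r##"..."##)
--     # The terminating sequence is "# (quote then hashes), so check for that
--     hashes = "#"
--     while f'"{hashes}' in template_content:
--         hashes += "#"
--
--     # Format stop tokens - each on its own line for readability
--     if stop_tokens:
--         tokens_lines = ",\n        ".join(f'"{t}"' for t in stop_tokens)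
--         stop_tokens_block = f"stop_tokens: &[\n        {tokens_lines},\n    ],"
--     else:
--         stop_tokens_block = "stop_tokens: &[], // TODO: Fill manually or use --model-dir"
--
--     rust_code = f"""use crate::core::template_registry::TemplateEntry;
--
-- pub const TEMPLATE: TemplateEntry = TemplateEntry {{
--     name: "{name}",
--     template: r{hashes}"{template_content}"{hashes},
--     {stop_tokens_block}
--     force_bos: false,
-- }};
-- """
--     return rust_code
-- ===== SOURCE B (Python) =====
-- def generate_rust_struct(name, template_content, stop_tokens=None):
--     """
--     Wraps the template in a Rust TemplateEntry struct.
--     """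
--     # Single pass: the delimiter needs one more '#' than the longest run of
--     # '#' immediately following a '"' in the template.
--     best = 0
--     cur = -1  # -1: not after a quote; k >= 0: after '"' followed by k '#'
--     for c in template_content:
--         if c == '"':
--             cur = 0
--         elif c == '#' and cur >= 0:
--             cur += 1
--             if best < cur:
--                 best = cur
--         else:
--             cur = -1
--     hashes = "#" * (best + 1)
--
--     lines = [
--         "use crate::core::template_registry::TemplateEntry;",
--         "",
--         "pub const TEMPLATE: TemplateEntry = TemplateEntry {",
--         '    name: "' + name + '",',
--         "    template: r" + hashes + '"' + template_content + '"' + hashes + ",",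
--     ]
--     if stop_tokens:
--         lines.append("    stop_tokens: &[")
--         for t in stop_tokens:
--             lines.append('        "' + t + '",')
--         lines.append("    ],")
--     else:
--         lines.append("    stop_tokens: &[], // TODO: Fill manually or use --model-dir")
--     lines.append("    force_bos: false,")
--     lines.append("};")
--
--     out = ""
--     for line in lines:
--         out += line + "\n"
--     return out
-- ===== Notes on version B (the rewrite author's own statement) =====
-- stated objective: alternative
-- what changed: A repeatedly substring-searches the template for '"'+hashes while growing the delimiter; B determines the delimiter length in a single left-to-right pass that tracks the longest run of '#' immediately following a '"', and builds the output by joining a list of lines instead of one f-string.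
import Mathlib
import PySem

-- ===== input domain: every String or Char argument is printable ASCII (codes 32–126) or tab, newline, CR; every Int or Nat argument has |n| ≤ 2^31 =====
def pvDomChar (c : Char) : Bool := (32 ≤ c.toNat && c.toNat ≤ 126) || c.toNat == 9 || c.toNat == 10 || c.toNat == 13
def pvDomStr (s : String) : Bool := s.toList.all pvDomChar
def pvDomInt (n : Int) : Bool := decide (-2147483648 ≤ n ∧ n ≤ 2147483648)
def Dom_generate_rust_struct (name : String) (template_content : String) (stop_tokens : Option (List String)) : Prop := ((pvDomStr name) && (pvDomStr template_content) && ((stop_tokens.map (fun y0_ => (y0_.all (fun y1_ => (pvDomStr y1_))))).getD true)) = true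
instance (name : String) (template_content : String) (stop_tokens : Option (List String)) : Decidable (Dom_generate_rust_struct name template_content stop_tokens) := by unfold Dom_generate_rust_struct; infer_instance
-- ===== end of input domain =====

set_option maxRecDepth 4000


-- B replaces A's grow-and-research delimiter loop by a single pass tracking the longest
-- '#'-run following a '"', and assembles the output from a list of lines (objective: alternative).

-- ===== PORT A =====
-- while f'"{hashes}' in template_content: hashes += "#"
-- (the Nat argument is fuel that only makes the loop total; content.length + 1 is proved sufficient below)
def pvA_hashLoop (content : List Char) (hashes : List Char) : Nat → List Char
  | 0 => hashes
  | fuel + 1 =>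
    if PySem.Chars.isIn ('"' :: hashes) content then
      pvA_hashLoop content (hashes ++ ['#']) fuel
    else hashes

def generate_rust_struct (name : String) (template_content : String) (stop_tokens : Option (List String)) : String :=
  let content := template_content.toList
  let hashes := pvA_hashLoop content ['#'] (content.length + 1)
  let stop_tokens_block : List Char :=
    match stop_tokens with
    | some ts =>
      if ts.isEmpty then "stop_tokens: &[], // TODO: Fill manually or use --model-dir".toList
      else
        let tokens_lines := PySem.Chars.join ",\n        ".toList (ts.map (fun t => '"' :: (t.toList ++ ['"'])))
        "stop_tokens: &[\n        ".toList ++ tokens_lines ++ ",\n    ],".toList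
    | none => "stop_tokens: &[], // TODO: Fill manually or use --model-dir".toList
  String.ofList ("use crate::core::template_registry::TemplateEntry;\n\npub const TEMPLATE: TemplateEntry = TemplateEntry {\n    name: \"".toList
    ++ name.toList ++ "\",\n    template: r".toList ++ hashes ++ ['"'] ++ content ++ ['"'] ++ hashes
    ++ ",\n    ".toList ++ stop_tokens_block ++ "\n    force_bos: false,\n};\n".toList)

-- ===== PORT B =====
-- one step of B's scan: state (best, cur); cur = -1 means "not after a quote"
def pvB_step (s : Int × Int) (c : Char) : Int × Int :=
  if c = '"' then (s.1, 0)
  else if c = '#' ∧ 0 ≤ s.2 then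
    (if s.1 < s.2 + 1 then s.2 + 1 else s.1, s.2 + 1)
  else (s.1, -1)

def generate_rust_struct_alt (name : String) (template_content : String) (stop_tokens : Option (List String)) : String :=
  let content := template_content.toList
  let best := (content.foldl pvB_step (0, -1)).1
  let hashes := List.replicate (best + 1).toNat '#'
  let headLines : List (List Char) :=
    [ "use crate::core::template_registry::TemplateEntry;".toList,
      [],
      "pub const TEMPLATE: TemplateEntry = TemplateEntry {".toList,
      "    name: \"".toList ++ name.toList ++ "\",".toList,
      "    template: r".toList ++ hashes ++ ['"'] ++ content ++ ['"'] ++ hashes ++ [','] ]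
  let stopLines : List (List Char) :=
    match stop_tokens with
    | some ts =>
      if ts.isEmpty then ["    stop_tokens: &[], // TODO: Fill manually or use --model-dir".toList]
      else "    stop_tokens: &[".toList ::
        (ts.map (fun t => "        \"".toList ++ t.toList ++ "\",".toList) ++ ["    ],".toList])
    | none => ["    stop_tokens: &[], // TODO: Fill manually or use --model-dir".toList]
  let lines := headLines ++ stopLines ++ ["    force_bos: false,".toList, "};".toList]
  String.ofList (lines.foldl (fun out line => out ++ line ++ ['\n']) [])

-- ===== PRECONDITION & SPEC =====
def Spec_generate_rust_struct (name : String) (template_content : String) (stop_tokens : Option (List String)) (out : String) : Prop := out = generate_rust_struct_alt name template_content stop_tokens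
instance (name : String) (template_content : String) (stop_tokens : Option (List String)) (out : String) : Decidable (Spec_generate_rust_struct name template_content stop_tokens out) := by unfold Spec_generate_rust_struct; infer_instance

-- ===== CLAIM (what is proved, stated in full; the proofs are below) =====
def Claim_equal_generate_rust_struct : Prop := ∀ (name : String) (template_content : String) (stop_tokens : Option (List String)), Dom_generate_rust_struct name template_content stop_tokens → Spec_generate_rust_struct name template_content stop_tokens (generate_rust_struct name template_content stop_tokens)

-- ===== LEMMAS AND PROOFS =====

-- the pattern A searches for: a quote followed by k hashes
def pvQ (k : Nat) : List Char := '"' :: List.replicate k '#'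

theorem pvQ_reverse (k : Nat) : (pvQ k).reverse = List.replicate k '#' ++ ['"'] := by
  simp [pvQ]

theorem pvQ_suffix_pvQ {a b : Nat} (h : pvQ a <:+ pvQ b) : a = b := by
  obtain ⟨u, hu⟩ := h
  cases u with
  | nil =>
    simp only [List.nil_append, pvQ, List.cons.injEq] at hu
    have := congrArg List.length hu.2
    simpa using this
  | cons c u' =>
    simp only [pvQ, List.cons_append] at hu
    obtain ⟨hc, hrep⟩ := List.cons.injEq .. ▸ hu
    have hm : '"' ∈ u' ++ '"' :: List.replicate a '#' := by simp
    rw [hrep] at hm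
    simp at hm

theorem pvQ_suffix_unique {p : List Char} {k₁ k₂ : Nat}
    (h₁ : pvQ k₁ <:+ p) (h₂ : pvQ k₂ <:+ p) : k₁ = k₂ := by
  rcases List.suffix_or_suffix_of_suffix h₁ h₂ with h | h
  · exact pvQ_suffix_pvQ h
  · exact (pvQ_suffix_pvQ h).symm

theorem pv_infix_concat_iff (s p : List Char) (x : Char) :
    s <:+: p ++ [x] ↔ s <:+: p ∨ s <:+ p ++ [x] := by
  rw [← List.reverse_infix]
  rw [show (p ++ [x]).reverse = x :: p.reverse by simp]
  rw [List.infix_cons_iff]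
  rw [show (x :: p.reverse) = (p ++ [x]).reverse by simp]
  rw [List.reverse_prefix, List.reverse_infix]
  exact Or.comm

theorem pvQ_suffix_concat (k : Nat) (p : List Char) (x : Char) :
    pvQ k <:+ p ++ [x] ↔ (k = 0 ∧ x = '"') ∨ (∃ j, k = j + 1 ∧ x = '#' ∧ pvQ j <:+ p) := by
  rw [← List.reverse_prefix, pvQ_reverse]
  rw [show (p ++ [x]).reverse = x :: p.reverse by simp]
  cases k with
  | zero =>
    simp only [List.replicate_zero, List.nil_append]
    rw [show (['"'] : List Char) = '"' :: ([] : List Char) from rfl, List.cons_prefix_cons]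
    simp [eq_comm]
  | succ j =>
    rw [show List.replicate (j + 1) '#' ++ ['"'] = '#' :: (List.replicate j '#' ++ ['"']) from rfl,
      List.cons_prefix_cons, ← pvQ_reverse, List.reverse_prefix]
    constructor
    · rintro ⟨hx, hs⟩
      exact Or.inr ⟨j, rfl, hx.symm, hs⟩
    · rintro (⟨h0, _⟩ | ⟨j', hj', hx, hs⟩)
      · omega
      · obtain rfl : j = j' := by omega
        exact ⟨hx.symm, hs⟩

-- the invariant of B's scan over the processed prefix p
def pvInv (p : List Char) (s : Int × Int) : Prop :=
  0 ≤ s.1 ∧ s.2 ≤ s.1 ∧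
  (∀ k : Nat, 1 ≤ k → (pvQ k <:+: p ↔ (k : Int) ≤ s.1)) ∧
  ((s.2 = -1 ∧ ∀ k : Nat, ¬ pvQ k <:+ p) ∨ (∃ k : Nat, s.2 = (k : Int) ∧ pvQ k <:+ p))

theorem pvInv_nil : pvInv [] (0, -1) := by
  refine ⟨le_refl 0, by norm_num, fun k hk => ?_, Or.inl ⟨rfl, fun k h => ?_⟩⟩
  · constructor
    · intro h
      have hl := h.length_le
      simp [pvQ] at hl
    · intro h
      exfalso
      omega
  · have := h.length_le
    simp [pvQ] at this

theorem pvInv_step {p : List Char} {s : Int × Int} (h : pvInv p s) (x : Char) :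
    pvInv (p ++ [x]) (pvB_step s x) := by
  obtain ⟨hb0, hcb, hiff, hcur⟩ := h
  by_cases hq : x = '"'
  · -- x = '"' : state becomes (s.1, 0)
    subst hq
    rw [show pvB_step s '"' = (s.1, 0) by simp [pvB_step]]
    refine ⟨hb0, hb0, fun k hk => ?_, Or.inr ⟨0, rfl, pvQ_suffix_concat 0 p '"' |>.mpr (Or.inl ⟨rfl, rfl⟩)⟩⟩
    rw [pv_infix_concat_iff, pvQ_suffix_concat]
    constructor
    · rintro (hin | (⟨h0, _⟩ | ⟨j, _, hx, _⟩))
      · exact (hiff k hk).mp hin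
      · omega
      · exact absurd hx (by decide)
    · intro hkb
      exact Or.inl ((hiff k hk).mpr hkb)
  by_cases hh : x = '#' ∧ 0 ≤ s.2
  · -- x = '#' and cur ≥ 0 : state becomes (max, cur+1)
    obtain ⟨hx, hge⟩ := hh
    subst hx
    rw [show pvB_step s '#' = (if s.1 < s.2 + 1 then s.2 + 1 else s.1, s.2 + 1) by
      simp [pvB_step, hge]]
    rcases hcur with ⟨hm1, _⟩ | ⟨k0, hk0, hsuf⟩
    · omega
    refine ⟨?_, ?_, fun k hk => ?_, Or.inr ⟨k0 + 1, by push_cast; omega,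
      pvQ_suffix_concat (k0 + 1) p '#' |>.mpr (Or.inr ⟨k0, rfl, rfl, hsuf⟩)⟩⟩
    · dsimp only
      split_ifs <;> omega
    · dsimp only
      split_ifs <;> omega
    · dsimp only
      rw [pv_infix_concat_iff, pvQ_suffix_concat]
      constructor
      · rintro (hin | (⟨h0, _⟩ | ⟨j, hkj, _, hjsuf⟩))
        · have := (hiff k hk).mp hin
          split_ifs <;> omega
        · omega
        · obtain rfl : j = k0 := pvQ_suffix_unique hjsuf hsuf
          split_ifs <;> omega
      · intro hkb
        by_cases hks : (k : Int) ≤ s.1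
        · exact Or.inl ((hiff k hk).mpr hks)
        · refine Or.inr (Or.inr ⟨k0, ?_, rfl, hsuf⟩)
          split_ifs at hkb <;> omega
  · -- any other character : state becomes (s.1, -1)
    rw [show pvB_step s x = (s.1, -1) by simp [pvB_step, hq, hh]]
    have hnosuf : ∀ k : Nat, ¬ pvQ k <:+ p ++ [x] := by
      intro k hk
      rcases (pvQ_suffix_concat k p x).mp hk with ⟨_, hx⟩ | ⟨j, _, hx, hjsuf⟩
      · exact hq hx
      · rcases hcur with ⟨_, hnone⟩ | ⟨k0, hk0, _⟩
        · exact hnone j hjsuf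
        · exact hh ⟨hx, by omega⟩
    refine ⟨hb0, by dsimp only; omega, fun k hk => ?_, Or.inl ⟨rfl, hnosuf⟩⟩
    rw [pv_infix_concat_iff]
    constructor
    · rintro (hin | hsufnew)
      · exact (hiff k hk).mp hin
      · exact absurd hsufnew (hnosuf k)
    · intro hkb
      exact Or.inl ((hiff k hk).mpr hkb)

theorem pvInv_foldl (l : List Char) : ∀ (p : List Char) (s : Int × Int), pvInv p s →
    pvInv (p ++ l) (l.foldl pvB_step s) := by
  induction l with
  | nil => intro p s h; simpa using h
  | cons x t ih =>
    intro p s h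
    have := ih (p ++ [x]) (pvB_step s x) (pvInv_step h x)
    simpa using this

theorem pvInv_scan (l : List Char) : pvInv l (l.foldl pvB_step (0, -1)) := by
  simpa using pvInv_foldl l [] (0, -1) pvInv_nil

-- A's loop computes '#' * (best + 1)
theorem pvA_hashLoop_eq (l : List Char) (b : Int) (hb : 0 ≤ b)
    (hiff : ∀ k : Nat, 1 ≤ k → (pvQ k <:+: l ↔ (k : Int) ≤ b)) :
    ∀ (fuel m : Nat), 1 ≤ m → (m : Int) ≤ b + 1 → (b + 1 - m).toNat < fuel →
    pvA_hashLoop l (List.replicate m '#') fuel = List.replicate (b + 1).toNat '#' := by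
  intro fuel
  induction fuel with
  | zero => intro m _ _ hf; omega
  | succ fuel ih =>
    intro m hm1 hmb hf
    by_cases hm : (m : Int) ≤ b
    · have hc : PySem.Chars.isIn ('"' :: List.replicate m '#') l = true :=
        (PySem.Chars.isIn_iff_infix _ _).mpr ((hiff m hm1).mpr hm)
      rw [pvA_hashLoop, if_pos hc, ← List.replicate_succ']
      exact ih (m + 1) (by omega) (by push_cast; omega) (by omega)
    · have heq : (m : Int) = b + 1 := by omega
      have hc : PySem.Chars.isIn ('"' :: List.replicate m '#') l = false :=
        (PySem.Chars.isIn_eq_false_iff _ _).mpr (fun hin => hm (by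
          have := (hiff m hm1).mp hin
          omega))
      rw [pvA_hashLoop, if_neg (by simp [hc])]
      congr 1
      omega

theorem pv_hashes_eq (l : List Char) :
    pvA_hashLoop l ['#'] (l.length + 1) =
      List.replicate ((l.foldl pvB_step (0, -1)).1 + 1).toNat '#' := by
  obtain ⟨hb0, _, hiff, _⟩ := pvInv_scan l
  have hlen : (l.foldl pvB_step (0, -1)).1 ≤ (l.length : Int) := by
    by_cases h1 : (1 : Int) ≤ (l.foldl pvB_step (0, -1)).1
    · have hk : ((l.foldl pvB_step (0, -1)).1.toNat : Int) = (l.foldl pvB_step (0, -1)).1 := by omega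
      have hin := (hiff (l.foldl pvB_step (0, -1)).1.toNat (by omega)).mpr (by omega)
      have := hin.length_le
      simp [pvQ] at this
      omega
    · omega
  rw [show (['#'] : List Char) = List.replicate 1 '#' from rfl]
  exact pvA_hashLoop_eq l _ hb0 hiff (l.length + 1) 1 (le_refl 1) (by omega) (by omega)

-- B's line fold is a flatten
theorem pv_foldl_lines (lines : List (List Char)) : ∀ acc : List Char,
    lines.foldl (fun out line => out ++ line ++ ['\n']) acc =
      acc ++ (lines.map (fun line => line ++ ['\n'])).flatten := by
  induction lines with
  | nil => simp
  | cons l t ih => intro acc; simp [List.foldl_cons, List.append_assoc]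

theorem pv_join_expand (t : String) (rest : List String) :
    PySem.Chars.join ",\n        ".toList
        (('"' :: (t.toList ++ ['"'])) :: List.map (fun u => '"' :: (u.toList ++ ['"'])) rest) =
      '"' :: (t.toList ++ ['"']) ++
        (List.map (fun u => ",\n        ".toList ++ ('"' :: (u.toList ++ ['"']))) rest).flatten := by
  induction rest generalizing t with
  | nil => simp [PySem.Chars.join_singleton]
  | cons u r ih =>
    rw [List.map_cons, PySem.Chars.join_cons_cons, ih u]
    simp [List.append_assoc]

theorem pv_shift (rest : List String) (tail : List Char) :
    (List.map (fun u : String => ',' :: '\n' :: ' ' :: ' ' :: ' ' :: ' ' :: ' ' :: ' ' :: ' ' :: ' ' ::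
        '"' :: (u.toList ++ ['"'])) rest).flatten ++ (',' :: '\n' :: tail) =
    ',' :: '\n' :: ((List.map ((fun line => line ++ ['\n']) ∘ fun u : String =>
        ' ' :: ' ' :: ' ' :: ' ' :: ' ' :: ' ' :: ' ' :: ' ' ::
        '"' :: (u.toList ++ ['"', ','])) rest).flatten ++ tail) := by
  induction rest with
  | nil => simp
  | cons u r ih =>
    simp only [List.map_cons, List.flatten_cons, List.append_assoc, Function.comp_apply,
      List.cons_append]
    rw [ih]
    simp

-- ===== VERDICT (by name: the statement is the Claim_ definition above) =====
theorem generate_rust_struct_spec : Claim_equal_generate_rust_struct := by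
  intro name template stop _
  unfold Spec_generate_rust_struct generate_rust_struct generate_rust_struct_alt
  dsimp only
  rw [pv_hashes_eq, pv_foldl_lines]
  rcases stop with _ | (_ | ⟨t, rest⟩)
  · simp [List.append_assoc]
  · simp [List.append_assoc]
  · simp only [List.isEmpty_cons, Bool.false_eq_true, if_false, List.map_cons]
    rw [pv_join_expand t rest]
    set_option maxHeartbeats 1000000 in
    simp [List.append_assoc]
    rw [pv_shift]
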